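-- pv_equiv track=rewrite | github.com/spektre-labs/creation-os | mlx_creation_os/arc_closed_loop 2.py | _infer_color_map
-- ===== SOURCE A (Python) =====
-- from typing import Any, Callable, Dict, List, Optional, Sequence, Tuple, Union
--
-- Grid = List[List[int]]
--
-- def grid_dims(g: Grid) -> Tuple[int, int]:
--     return (len(g), len(g[0]) if g else 0)
--
-- def _infer_color_map(inp: Grid, out: Grid) -> Optional[Dict[int, int]]:
--     if grid_dims(inp) != grid_dims(out):
--         return None
--     cmap: Dict[int, int] = {}
--     for ri, ro in zip(inp, out):
--         for ci, co in zip(ri, ro):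
--             if ci in cmap and cmap[ci] != co:
--                 return None
--             cmap[ci] = co
--     return cmap
-- ===== SOURCE B (Python) =====
-- from typing import Dict, List, Optional, Tuple
--
-- Grid = List[List[int]]
--
-- def grid_dims(g: Grid) -> Tuple[int, int]:
--     return (len(g), len(g[0]) if g else 0)
--
-- def _infer_color_map(inp: Grid, out: Grid) -> Optional[Dict[int, int]]:
--     if grid_dims(inp) != grid_dims(out):
--         return None
--     # flatten the aligned grids into one list of (input color, output color) cells
--     cells = [pair for ri, ro in zip(inp, out) for pair in zip(ri, ro)]
--     cmap: Dict[int, int] = {}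
--     # for each distinct input color (first-seen order), rescan all cells for its outputs
--     for c in dict.fromkeys(ci for ci, _ in cells):
--         outs = [co for ci, co in cells if ci == c]
--         if any(o != outs[0] for o in outs):
--             return None
--         cmap[c] = outs[0]
--     return cmap
-- ===== Notes on version B (the rewrite author's own statement) =====
-- stated objective: alternative
-- what changed: Replaces A's single fused hash-map pass (check-on-write with early exit) by a brute-force per-color decomposition: flatten the zipped grids into a cell list once, then for each distinct input color rescan the whole cell list collecting its output colors and reject if they are not all equal.
import Mathlib
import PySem

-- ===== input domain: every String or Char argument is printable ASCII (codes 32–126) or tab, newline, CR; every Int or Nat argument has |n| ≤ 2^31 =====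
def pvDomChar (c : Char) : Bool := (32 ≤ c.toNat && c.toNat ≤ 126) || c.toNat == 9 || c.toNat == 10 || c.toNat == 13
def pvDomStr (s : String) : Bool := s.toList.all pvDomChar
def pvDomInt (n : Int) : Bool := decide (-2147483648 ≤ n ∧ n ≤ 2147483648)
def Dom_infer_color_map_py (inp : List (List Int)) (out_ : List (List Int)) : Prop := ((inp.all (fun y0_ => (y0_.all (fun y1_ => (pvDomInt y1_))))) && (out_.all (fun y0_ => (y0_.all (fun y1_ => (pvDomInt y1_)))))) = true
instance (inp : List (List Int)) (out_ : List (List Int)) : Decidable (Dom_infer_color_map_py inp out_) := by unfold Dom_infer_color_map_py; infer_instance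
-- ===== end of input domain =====

-- B replaces A's fused check-on-write hash pass by a per-distinct-color rescan of the flattened cell list (alternative decomposition, same results).

-- ===== PORT A =====
def gridDims (g : List (List Int)) : Int × Int :=
  ((g.length : Int), match g with | [] => (0 : Int) | r :: _ => (r.length : Int))

def aCells (cmap : PySem.Dict Int Int) (cells : List (Int × Int)) : Option (PySem.Dict Int Int) :=
  match cells with
  | [] => some cmap
  | (ci, co) :: rest =>
    if cmap.contains ci = true ∧ cmap.get? ci ≠ some co then none
    else aCells (cmap.insert ci co) rest

def aRows (cmap : PySem.Dict Int Int) (rows : List (List Int × List Int)) : Option (PySem.Dict Int Int) :=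
  match rows with
  | [] => some cmap
  | (ri, ro) :: rest =>
    match aCells cmap (ri.zip ro) with
    | none => none
    | some c => aRows c rest

def infer_color_map_py (inp : List (List Int)) (out_ : List (List Int)) : Option (List (Int × Int)) :=
  if gridDims inp ≠ gridDims out_ then none
  else Option.map PySem.Dict.items (aRows PySem.Dict.empty (inp.zip out_))

-- ===== PORT B =====
-- per distinct input color c: outs = [co for ci, co in cells if ci == c]; reject unless constant
def bColors (cells : List (Int × Int)) (colors : List Int) : Option (List (Int × Int)) :=
  match colors with
  | [] => some []
  | c :: rest =>
    match (cells.filter (fun p => p.1 == c)).map Prod.snd with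
    | [] => none   -- Python: cmap[c] = outs[0] would raise IndexError; unreachable (each color comes from cells)
    | o0 :: t =>
      if (o0 :: t).any (fun o => o != o0) then none
      else (bColors cells rest).map (fun m => (c, o0) :: m)

def infer_color_map_py_alt (inp : List (List Int)) (out_ : List (List Int)) : Option (List (Int × Int)) :=
  if gridDims inp ≠ gridDims out_ then none
  else
    let cells := (inp.zip out_).flatMap (fun p => p.1.zip p.2)
    bColors cells (PySem.List.dedup (cells.map Prod.fst))

-- ===== PRECONDITION & SPEC =====
def Spec_infer_color_map_py (inp : List (List Int)) (out_ : List (List Int)) (out : Option (List (Int × Int))) : Prop := out = infer_color_map_py_alt inp out_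
instance (inp : List (List Int)) (out_ : List (List Int)) (out : Option (List (Int × Int))) : Decidable (Spec_infer_color_map_py inp out_ out) := by unfold Spec_infer_color_map_py; infer_instance

-- ===== CLAIM (what is proved, stated in full; the proofs are below) =====
def Claim_equal_infer_color_map_py : Prop := ∀ (inp : List (List Int)) (out_ : List (List Int)), Dom_infer_color_map_py inp out_ → Spec_infer_color_map_py inp out_ (infer_color_map_py inp out_)

-- ===== LEMMAS AND PROOFS =====

-- first output color recorded for input color k (B's outs[0]; equals A's stored value under consistency)
def fv (cells : List (Int × Int)) (k : Int) : Int :=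
  (((cells.find? (fun p => p.1 == k)).map Prod.snd).getD 0)

-- the cell list is self-consistent: equal input colors always carry equal output colors
def consB (cells : List (Int × Int)) : Bool :=
  cells.all (fun p => cells.all (fun q => p.1 != q.1 || p.2 == q.2))

theorem consB_iff (cells : List (Int × Int)) :
    consB cells = true ↔ ∀ p ∈ cells, ∀ q ∈ cells, p.1 = q.1 → p.2 = q.2 := by
  simp only [consB, List.all_eq_true, Bool.or_eq_true, bne_iff_ne, beq_iff_eq]
  constructor
  · intro h p hp q hq he
    rcases h p hp q hq with h' | h' <;> [exact absurd he h'; exact h']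
  · intro h p hp q hq
    by_cases he : p.1 = q.1
    · exact Or.inr (h p hp q hq he)
    · exact Or.inl he

theorem fv_cons_of_ne (k v : Int) (rest : List (Int × Int)) (k' : Int) (h : k' ≠ k) :
    fv ((k, v) :: rest) k' = fv rest k' := by
  simp [fv, beq_iff_eq, Ne.symm h]

theorem fv_cons_self (k v : Int) (rest : List (Int × Int)) :
    fv ((k, v) :: rest) k = v := by
  simp [fv]

-- ----- A side: characterization of the fused pass -----

theorem items_insert_of_get?_self (c : PySem.Dict Int Int) (k v : Int)
    (hnd : c.keys.Nodup) (h : c.get? k = some v) : (c.insert k v).items = c.items := by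
  have hcon : c.contains k = true := by
    rw [PySem.Dict.contains_eq_isSome_get?, h]; rfl
  rw [PySem.Dict.items_insert_of_contains c v hcon]
  have hid : ∀ p ∈ c.items, (fun p : Int × Int => if (p.1 == k) = true then (k, v) else p) p = id p := by
    intro p hp
    by_cases hk : (p.1 == k) = true
    · have hk' : p.1 = k := by simpa using hk
      have hv : c.get? p.1 = some p.2 := by
        cases p with
        | mk a b => exact PySem.Dict.get?_of_mem_items c hp hnd
      rw [hk', h] at hv
      simp only [Option.some.injEq] at hv
      simp only [hk, if_pos, id_eq]
      cases p with
      | mk a b =>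
        simp only at hk' hv
        rw [hk', hv]
    · simp [hk]
  rw [List.map_congr_left hid, List.map_id]

theorem A_char : ∀ (cells : List (Int × Int)) (c : PySem.Dict Int Int), c.keys.Nodup →
    Option.map PySem.Dict.items (aCells c cells) =
      if consB cells && cells.all (fun p => c.get? p.1 == none || c.get? p.1 == some p.2) then
        some (c.items ++ ((PySem.Set.ofList (cells.map Prod.fst)).filter
          (fun k => !(c.contains k))).map (fun k => (k, fv cells k)))
      else none := by
  intro cells
  induction cells with
  | nil =>
    intro c _
    simp [aCells, consB, PySem.Set.ofList]
  | cons x rest ih =>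
    intro c hnd
    obtain ⟨k, v⟩ := x
    rw [aCells]
    by_cases hcf : c.contains k = true ∧ c.get? k ≠ some v
    · have hcnot : ¬ ((consB ((k, v) :: rest) &&
            ((k, v) :: rest).all (fun p => c.get? p.1 == none || c.get? p.1 == some p.2)) = true) := by
        intro hcond
        simp only [Bool.and_eq_true, List.all_cons, Bool.or_eq_true, beq_iff_eq] at hcond
        rcases hcond.2.1 with h | h
        · have := hcf.1
          rw [PySem.Dict.contains_eq_isSome_get?, h] at this
          simp at this
        · exact hcf.2 h
      rw [if_pos hcf, if_neg hcnot]
      rfl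
    · rw [if_neg hcf]
      have hkv : c.get? k = none ∨ c.get? k = some v := by
        by_cases hc : c.contains k = true
        · by_cases hg : c.get? k = some v
          · exact Or.inr hg
          · exact absurd ⟨hc, hg⟩ hcf
        · left
          rw [PySem.Dict.contains_eq_isSome_get?] at hc
          cases hg : c.get? k with
          | none => rfl
          | some w => rw [hg] at hc; simp at hc
      have hnd' : (c.insert k v).keys.Nodup := by
        by_cases hc : c.contains k = true
        · rw [PySem.Dict.keys_insert_of_contains c v hc]; exact hnd
        · rw [PySem.Dict.keys_insert_of_not_contains c v (by simpa using hc)]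
          refine List.nodup_append.mpr ⟨hnd, List.nodup_singleton _, ?_⟩
          intro a ha b hb
          rw [List.mem_singleton] at hb
          subst hb
          intro hab
          rw [hab] at ha
          exact absurd ((PySem.Dict.contains_iff_mem_keys c b).mpr ha) hc
      rw [ih _ hnd']
      -- the enabling condition is preserved by folding (k, v) into the accumulator
      have hcond : (consB ((k, v) :: rest) &&
            ((k, v) :: rest).all (fun p => c.get? p.1 == none || c.get? p.1 == some p.2))
          = (consB rest &&
            rest.all (fun p => (c.insert k v).get? p.1 == none || (c.insert k v).get? p.1 == some p.2)) := by
        rw [Bool.eq_iff_iff]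
        simp only [Bool.and_eq_true, consB_iff, List.all_eq_true, Bool.or_eq_true, beq_iff_eq]
        constructor
        · rintro ⟨hP, hC⟩
          refine ⟨fun p hp q hq => hP p (List.mem_cons_of_mem _ hp) q (List.mem_cons_of_mem _ hq), ?_⟩
          intro p hp
          rw [PySem.Dict.get?_insert]
          by_cases hpk : p.1 = k
          · right
            rw [if_pos hpk]
            have := hP p (List.mem_cons_of_mem _ hp) (k, v) List.mem_cons_self hpk
            rw [this]
          · rw [if_neg hpk]
            exact hC p (List.mem_cons_of_mem _ hp)
        · rintro ⟨hP, hC⟩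
          constructor
          · intro p hp q hq he
            rcases List.mem_cons.mp hp with rfl | hp' <;> rcases List.mem_cons.mp hq with rfl | hq'
            · rfl
            · have := hC q hq'
              rw [PySem.Dict.get?_insert, if_pos he.symm] at this
              rcases this with h | h
              · exact absurd h (by simp)
              · exact (Option.some.injEq _ _ ▸ h).symm ▸ (by injection h with h'; exact h'.symm ▸ rfl)
            · have := hC p hp'
              rw [PySem.Dict.get?_insert, if_pos he] at this
              rcases this with h | h
              · exact absurd h (by simp)
              · injection h with h'; exact h'.symm
            · exact hP p hp' q hq' he
          · intro p hp
            rcases List.mem_cons.mp hp with rfl | hp'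
            · exact hkv
            · have := hC p hp'
              rw [PySem.Dict.get?_insert] at this
              by_cases hpk : p.1 = k
              · rw [if_pos hpk] at this
                rcases this with h | h
                · exact absurd h (by simp)
                · injection h with h'
                  rw [hpk]
                  rcases hkv with hk0 | hk0
                  · exact Or.inl hk0
                  · right; rw [hk0, h']
              · rw [if_neg hpk] at this
                exact this
      rw [hcond]
      by_cases h2 : (consB rest &&
            rest.all (fun p => (c.insert k v).get? p.1 == none || (c.insert k v).get? p.1 == some p.2)) = true
      · rw [if_pos h2, if_pos h2]
        congr 1
        simp only [List.map_cons, PySem.Set.ofList_cons]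
        have hdis : (PySem.Set.ofList (rest.map Prod.fst)).discard k
            = (PySem.Set.ofList (rest.map Prod.fst)).filter (fun y => !(y == k)) := rfl
        rw [hdis, List.filter_cons]
        have htail : ((PySem.Set.ofList (rest.map Prod.fst)).filter
              (fun k' => !(c.insert k v).contains k')).map (fun k' => (k', fv rest k'))
            = (((PySem.Set.ofList (rest.map Prod.fst)).filter (fun y => !(y == k))).filter
              (fun k' => !c.contains k')).map (fun k' => (k', fv ((k, v) :: rest) k')) := by
          rw [List.filter_filter]
          have hpf : ∀ k' ∈ PySem.Set.ofList (rest.map Prod.fst),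
              (!(c.insert k v).contains k') = ((!c.contains k') && (!(k' == k))) := by
            intro k' _
            rw [PySem.Dict.contains_insert]
            rw [Bool.not_or, Bool.and_comm]
          rw [List.filter_congr hpf]
          apply List.map_congr_left
          intro k' hk'
          have : k' ≠ k := by
            have hpp := (List.mem_filter.mp hk').2
            simp only [Bool.and_eq_true, Bool.not_eq_true'] at hpp
            simpa using hpp.2
          rw [fv_cons_of_ne k v rest k' this]
        by_cases hc : c.contains k = true
        · have hgv : c.get? k = some v := by
            rcases hkv with h | h
            · rw [PySem.Dict.contains_eq_isSome_get?, h] at hc; simp at hc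
            · exact h
          rw [items_insert_of_get?_self c k v hnd hgv]
          rw [if_neg (by simp [hc])]
          rw [htail]
        · rw [PySem.Dict.items_insert_of_not_contains c v (by simpa using hc)]
          rw [if_pos (by simp [Bool.not_eq_true] at hc; simp [hc])]
          rw [List.map_cons, fv_cons_self, List.append_assoc, List.singleton_append]
          rw [htail]
      · rw [if_neg h2, if_neg h2]

-- ----- B side: characterization of the per-color rescan -----

theorem B_char : ∀ (colors : List Int) (cells : List (Int × Int)),
    (∀ c ∈ colors, ∃ p ∈ cells, p.1 = c) →
    bColors cells colors =
      if colors.all (fun c => cells.all (fun p => p.1 != c || p.2 == fv cells c)) then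
        some (colors.map (fun c => (c, fv cells c)))
      else none := by
  intro colors
  induction colors with
  | nil => intro cells _; simp [bColors]
  | cons c rest ih =>
    intro cells h
    obtain ⟨p0, hp0, hp0c⟩ := h c List.mem_cons_self
    have hmemf : p0 ∈ cells.filter (fun p => p.1 == c) :=
      List.mem_filter.mpr ⟨hp0, by simp [hp0c]⟩
    rw [bColors]
    cases hout : (cells.filter (fun p => p.1 == c)).map Prod.snd with
    | nil =>
      exact absurd (List.mem_map_of_mem hmemf) (by rw [hout]; simp)
    | cons o0 t =>
      have ho0 : o0 = fv cells c := by
        have h1 : ((cells.filter (fun p => p.1 == c)).map Prod.snd).head? = some o0 := by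
          rw [hout]; rfl
        rw [List.head?_map, List.head?_filter] at h1
        simp [fv, h1]
      show (if (o0 :: t).any (fun o => o != o0) = true then none
            else (bColors cells rest).map (fun m => (c, o0) :: m)) = _
      by_cases hany : ((o0 :: t).any (fun o => o != o0)) = true
      · have hcnot : ¬ (((c :: rest).all (fun c =>
            cells.all fun p => p.1 != c || p.2 == fv cells c)) = true) := by
          intro hcond
          simp only [List.all_cons, Bool.and_eq_true] at hcond
          obtain ⟨hhead, _⟩ := hcond
          rw [List.any_eq_true] at hany
          obtain ⟨o, ho, hne⟩ := hany
          rw [← hout] at ho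
          obtain ⟨p, hpf, hps⟩ := List.mem_map.mp ho
          have hpc := List.mem_filter.mp hpf
          have hthis := List.all_eq_true.mp hhead p hpc.1
          simp only [Bool.or_eq_true, bne_iff_ne, beq_iff_eq] at hthis
          rcases hthis with h' | h'
          · exact h' (by simpa using hpc.2)
          · exact (by simpa using hne : o ≠ o0) (by rw [← hps, h', ho0])
        rw [if_pos hany, if_neg hcnot]
      · have hall : ∀ o ∈ o0 :: t, o = o0 := by
          rw [Bool.not_eq_true, List.any_eq_false] at hany
          intro o ho
          have := hany o ho
          simpa using this
        have hhead : cells.all (fun p => p.1 != c || p.2 == fv cells c) = true := by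
          rw [List.all_eq_true]
          intro p hp
          by_cases hpc : p.1 = c
          · have hmem : p.2 ∈ (cells.filter (fun p => p.1 == c)).map Prod.snd :=
              List.mem_map_of_mem (List.mem_filter.mpr ⟨hp, by simp [hpc]⟩)
            rw [hout] at hmem
            have := hall _ hmem
            simp [this, ho0]
          · simp [hpc]
        rw [if_neg hany, ih cells (fun c' hc' => h c' (List.mem_cons_of_mem _ hc'))]
        simp only [List.all_cons, hhead, Bool.true_and]
        by_cases hr : (rest.all fun c => cells.all fun p => p.1 != c || p.2 == fv cells c) = true
        · rw [if_pos hr, if_pos hr]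
          simp [List.map_cons, ho0]
        · rw [if_neg hr, if_neg hr]
          rfl

-- ----- glue -----

theorem aCells_append : ∀ (xs ys : List (Int × Int)) (c : PySem.Dict Int Int),
    aCells c (xs ++ ys) = (aCells c xs).bind (fun c' => aCells c' ys) := by
  intro xs
  induction xs with
  | nil => intro ys c; simp [aCells]
  | cons x rest ih =>
    intro ys c
    obtain ⟨ci, co⟩ := x
    rw [List.cons_append, aCells, aCells]
    split
    · rfl
    · exact ih ys _

theorem aRows_flat : ∀ (rows : List (List Int × List Int)) (c : PySem.Dict Int Int),
    aRows c rows = aCells c (rows.flatMap (fun p => p.1.zip p.2)) := by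
  intro rows
  induction rows with
  | nil => intro c; simp [aRows, aCells]
  | cons r rest ih =>
    intro c
    obtain ⟨ri, ro⟩ := r
    rw [aRows, List.flatMap_cons, aCells_append]
    cases h : aCells c (ri.zip ro) with
    | none => rfl
    | some c' => simp [ih]

theorem core (cells : List (Int × Int)) :
    Option.map PySem.Dict.items (aCells PySem.Dict.empty cells)
      = bColors cells (PySem.List.dedup (cells.map Prod.fst)) := by
  rw [A_char cells PySem.Dict.empty PySem.Dict.nodup_keys_empty]
  have hcompat : cells.all (fun p => (PySem.Dict.empty : PySem.Dict Int Int).get? p.1 == none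
      || (PySem.Dict.empty : PySem.Dict Int Int).get? p.1 == some p.2) = (true : Bool) := by
    simp [PySem.Dict.get?_empty]
  rw [hcompat, Bool.and_true]
  have hfilter : (PySem.Set.ofList (cells.map Prod.fst)).filter
      (fun k => !(PySem.Dict.empty : PySem.Dict Int Int).contains k)
      = PySem.Set.ofList (cells.map Prod.fst) := by
    simp [PySem.Dict.contains_empty]
  rw [hfilter, PySem.List.dedup_eq_ofList]
  have hmem : ∀ c ∈ PySem.Set.ofList (cells.map Prod.fst), ∃ p ∈ cells, p.1 = c := by
    intro c hc
    rw [PySem.Set.mem_ofList] at hc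
    obtain ⟨p, hp, hpc⟩ := List.mem_map.mp hc
    exact ⟨p, hp, hpc⟩
  rw [B_char _ cells hmem]
  have hcond : consB cells = (PySem.Set.ofList (cells.map Prod.fst)).all
      (fun c => cells.all fun p => p.1 != c || p.2 == fv cells c) := by
    rw [Bool.eq_iff_iff, consB_iff]
    simp only [List.all_eq_true, Bool.or_eq_true, bne_iff_ne, beq_iff_eq]
    constructor
    · intro hP c hc p hp
      by_cases hpc : p.1 = c
      · right
        have hsome : (cells.find? (fun r => r.1 == c)).isSome = true :=
          List.find?_isSome.mpr ⟨p, hp, by simp [hpc]⟩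
        obtain ⟨q, hq⟩ := Option.isSome_iff_exists.mp hsome
        have hqmem : q ∈ cells := List.mem_of_find?_eq_some hq
        have hqc : q.1 = c := by
          have := List.find?_some hq
          simpa using this
        have hpq : p.2 = q.2 := hP p hp q hqmem (by rw [hpc, hqc])
        rw [hpq]
        simp [fv, hq]
      · exact Or.inl hpc
    · intro hA p hp q hq he
      have hc : p.1 ∈ PySem.Set.ofList (cells.map Prod.fst) :=
        (PySem.Set.mem_ofList _ _).mpr (List.mem_map_of_mem hp)
      have h1 := hA p.1 hc p hp
      have h2 := hA p.1 hc q hq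
      rcases h1 with h1 | h1
      · exact absurd rfl h1
      · rcases h2 with h2 | h2
        · exact absurd he.symm h2
        · rw [h1, h2]
  rw [hcond]
  rfl

-- ===== VERDICT (by name: the statement is the Claim_ definition above) =====
theorem infer_color_map_py_spec : Claim_equal_infer_color_map_py := by
  intro inp out_ _
  unfold Spec_infer_color_map_py infer_color_map_py infer_color_map_py_alt
  by_cases hd : gridDims inp ≠ gridDims out_
  · rw [if_pos hd, if_pos hd]
  · rw [if_neg hd, if_neg hd, aRows_flat]
    exact core _
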